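-- pv_equiv track=rewrite | github.com/Aytirix/tetris_bot | testia.py | get_holes
-- ===== SOURCE A (Python) =====
-- def get_holes(board):
-- 	holes = 0
-- 	for col in range(len(board[0])):
-- 		block_found = False
-- 		for row in range(len(board)):
-- 			if board[row][col] != 0:
-- 				block_found = True
-- 			elif block_found:
-- 				holes += 1
-- 	return holes
-- ===== SOURCE B (Python) =====
-- def get_holes(board):
--     total = 0
--     for c in range(len(board[0])):
--         col = [row[c] for row in board]
--         top = next((i for i, v in enumerate(col) if v != 0), None)
--         if top is not None:
--             total += col[top:].count(0)
--     return total
-- ===== Notes on version B (the rewrite author's own statement) =====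
-- stated objective: simpler
-- what changed: B extracts each column as a list, finds the topmost filled cell with next(), and counts the zeros below it, instead of A's row-index loop carrying a block_found flag.
import Mathlib
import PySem

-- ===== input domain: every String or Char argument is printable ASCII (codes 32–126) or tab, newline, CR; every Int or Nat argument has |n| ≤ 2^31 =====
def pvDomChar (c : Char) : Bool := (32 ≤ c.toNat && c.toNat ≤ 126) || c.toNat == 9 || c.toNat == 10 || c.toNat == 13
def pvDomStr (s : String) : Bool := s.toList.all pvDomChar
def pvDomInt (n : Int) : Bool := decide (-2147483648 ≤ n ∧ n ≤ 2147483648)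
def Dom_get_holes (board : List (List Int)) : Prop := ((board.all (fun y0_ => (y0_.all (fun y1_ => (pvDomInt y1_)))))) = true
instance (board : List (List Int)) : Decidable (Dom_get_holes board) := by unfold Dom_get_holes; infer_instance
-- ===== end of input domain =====

-- B extracts each column and counts the zeros below its topmost filled cell instead of
-- A's flag-carrying row loop; objective: simpler. Return value only (no mutation involved).

-- ===== PORT A =====
-- for col in range(len(board[0])):  for row in range(len(board)): carry (holes, block_found)
-- (indices are in range under Pre_, so getD defaults are never used there)
def get_holes (board : List (List Int)) : Int :=
  (List.range (board.headD []).length).foldl (fun holes col =>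
    ((List.range board.length).foldl (fun (s : Int × Bool) row =>
        if (board.getD row []).getD col 0 ≠ 0 then (s.1, true)
        else if s.2 then (s.1 + 1, s.2) else s)
      (holes, false)).1) 0

-- ===== PORT B =====
-- next((i for i, v in enumerate(col) if v != 0), None) then col[top:].count(0)
def colHoles (col : List Int) : Int :=
  match col.findIdx? (fun v => v ≠ 0) with
  | none => 0
  | some top => ((col.drop top).count 0 : Int)

-- for c in range(len(board[0])): col = [row[c] for row in board]
-- (indices are in range under Pre_, so getD defaults are never used there)
def get_holes_alt (board : List (List Int)) : Int :=
  (List.range (board.headD []).length).foldl (fun total c =>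
    total + colHoles (board.map (fun row => row.getD c 0))) 0

-- ===== PRECONDITION & SPEC =====
-- Pre_ excludes the inputs on which A raises IndexError: the empty board (board[0])
-- and ragged boards with a row shorter than the first row (board[row][col]).
def Pre_get_holes (board : List (List Int)) : Prop :=
  board ≠ [] ∧ ∀ row ∈ board, (board.headD []).length ≤ row.length
instance (board : List (List Int)) : Decidable (Pre_get_holes board) := by
  unfold Pre_get_holes; infer_instance

def pvWitness_get_holes : List (List Int) := [[1, 0], [0, 2], [0, 0]]

def Spec_get_holes (board : List (List Int)) (out : Int) : Prop := out = get_holes_alt board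
instance (board : List (List Int)) (out : Int) : Decidable (Spec_get_holes board out) := by
  unfold Spec_get_holes; infer_instance

-- ===== CLAIM (what is proved, stated in full; the proofs are below) =====
def Claim_equal_get_holes : Prop := ∀ (board : List (List Int)), Dom_get_holes board → Pre_get_holes board → Spec_get_holes board (get_holes board)

-- ===== LEMMAS AND PROOFS =====

-- A's inner index loop over range(len(xs)) is the fold over xs itself
theorem foldl_range_getD {α β : Type} (g : β → α → β) (d : α) :
    ∀ (xs : List α) (init : β),
      (List.range xs.length).foldl (fun s i => g s (xs.getD i d)) init = xs.foldl g init := by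
  intro xs
  induction xs with
  | nil => intro init; simp
  | cons x t ih =>
    intro init
    simp only [List.length_cons, List.range_succ_eq_map, List.foldl_cons, List.foldl_map]
    simpa using ih (g init x)

def stepA (s : Int × Bool) (v : Int) : Int × Bool :=
  if v ≠ 0 then (s.1, true) else if s.2 then (s.1 + 1, s.2) else s

theorem stepA_true (col : List Int) : ∀ (c : Int),
    col.foldl stepA (c, true) = (c + (col.count 0 : Int), true) := by
  induction col with
  | nil => intro c; simp
  | cons v t ih =>
    intro c
    by_cases hv : v = 0
    · subst hv
      simp [stepA, ih]
      ring
    · simp [stepA, hv, ih]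

theorem stepA_false (col : List Int) : ∀ (c : Int),
    (col.foldl stepA (c, false)).1 = c + colHoles col := by
  induction col with
  | nil => intro c; simp [colHoles]
  | cons v t ih =>
    intro c
    by_cases hv : v = 0
    · subst hv
      have hfi : (List.findIdx? (fun v : Int => v ≠ 0) (0 :: t)) =
          (List.findIdx? (fun v : Int => v ≠ 0) t).map (· + 1) := by
        simp [List.findIdx?_cons]
      have hcol : colHoles (0 :: t) = colHoles t := by
        unfold colHoles
        rw [hfi]
        cases h : List.findIdx? (fun v : Int => v ≠ 0) t with
        | none => simp
        | some i => simp
      simp only [List.foldl_cons]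
      have : stepA (c, false) 0 = (c, false) := by simp [stepA]
      rw [this, ih, hcol]
    · have hcol : colHoles (v :: t) = ((v :: t).count 0 : Int) := by
        unfold colHoles
        have : (List.findIdx? (fun v : Int => v ≠ 0) (v :: t)) = some 0 := by
          simp [List.findIdx?_cons, hv]
        rw [this]
        simp
      simp only [List.foldl_cons]
      have : stepA (c, false) v = (c, true) := by simp [stepA, hv]
      rw [this, stepA_true, hcol]
      simp [hv]

theorem get_holes_spec' (board : List (List Int)) (_ : Pre_get_holes board) :
    get_holes board = get_holes_alt board := by
  unfold get_holes get_holes_alt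
  congr 1
  funext holes j
  rw [show (fun (s : Int × Bool) row =>
      if (board.getD row []).getD j 0 ≠ 0 then (s.1, true)
      else if s.2 then (s.1 + 1, s.2) else s)
    = (fun s row => stepA s ((board.getD row []).getD j 0)) from rfl]
  rw [foldl_range_getD (fun s v => stepA s (v.getD j 0)) [] board]
  rw [← List.foldl_map (g := stepA) (f := fun l : List Int => l.getD j 0)]
  rw [stepA_false]

-- ===== VERDICT (by name: the statement is the Claim_ definition above) =====
theorem get_holes_spec : Claim_equal_get_holes := by
  intro board _ hp
  unfold Spec_get_holes
  exact get_holes_spec' board hp
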